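-- pv_equiv track=rewrite | github.com/AI-STACK-dev/Algorithm_solving | sujang/boj/python/2138.py | solve
-- ===== SOURCE A (Python) =====
-- import copy
--
-- def on(arr,idx):
--     arr[idx] = 1- arr[idx]
--     if idx == 0:
--         arr[idx+1] = 1- arr[idx+1]
--     elif idx == len(arr)-1:
--         arr[idx-1] = 1- arr[idx-1]
--     else:
--         arr[idx-1] = 1- arr[idx-1]
--         arr[idx+1] = 1- arr[idx+1]
--     return arr
--
-- def solve(n,a,b):
--     fon = copy.deepcopy(a)
--     fof = copy.deepcopy(a)
--     fon = on(fon,0)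
--
--     onc = 1
--     ofc = 0
--     for i in range(1,n):
--         if fon[i-1] != b[i-1]:
--             fon = on(fon,i)
--             onc += 1
--         if fof[i-1] != b[i-1]:
--             fof = on(fof,i)
--             ofc += 1
--
--     result = []
--     if fon == b:
--         result.append(onc)
--     if fof == b:
--         result.append(ofc)
--
--     if len(result) == 0:
--         return -1
--     else:
--         return min(result)
-- ===== SOURCE B (Python) =====
-- def solve(n, a, b):
--     # Flip-parity reformulation: instead of mutating array copies, compute the
--     # greedy switch-press bit sequence f for each choice of pressing switch 0,
--     # then rebuild the final array from window parities of f.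
--     m = n if n > 1 else 1
--     cands = []
--     for first in (1, 0):
--         f = [first]
--         for i in range(1, m):
--             p = f[i - 1] + (f[i - 2] if i >= 2 else 0)
--             cur = a[i - 1] if p % 2 == 0 else 1 - a[i - 1]
--             f.append(1 if cur != b[i - 1] else 0)
--         res = []
--         for j in range(len(a)):
--             t = (f[j - 1] if 1 <= j and j - 1 < len(f) else 0) \
--                 + (f[j] if j < len(f) else 0) \
--                 + (f[j + 1] if j + 1 < len(f) else 0)
--             res.append(a[j] if t % 2 == 0 else 1 - a[j])
--         if res == b:
--             cands.append(sum(f))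
--     if len(cands) == 0:
--         return -1
--     else:
--         return min(cands)
-- ===== Notes on version B (the rewrite author's own statement) =====
-- stated objective: alternative
-- what changed: B replaces A's interleaved simulation on two mutated array copies with a flip-parity computation: for each choice of the first switch it builds the greedy press-bit sequence f using only the last two bits, then reconstructs the final array once from window parities of f.
-- outside the precondition, e.g. on solve(3, [0, 0], [0, 0, 0]): A returns -1, B returns -1
import Mathlib
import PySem

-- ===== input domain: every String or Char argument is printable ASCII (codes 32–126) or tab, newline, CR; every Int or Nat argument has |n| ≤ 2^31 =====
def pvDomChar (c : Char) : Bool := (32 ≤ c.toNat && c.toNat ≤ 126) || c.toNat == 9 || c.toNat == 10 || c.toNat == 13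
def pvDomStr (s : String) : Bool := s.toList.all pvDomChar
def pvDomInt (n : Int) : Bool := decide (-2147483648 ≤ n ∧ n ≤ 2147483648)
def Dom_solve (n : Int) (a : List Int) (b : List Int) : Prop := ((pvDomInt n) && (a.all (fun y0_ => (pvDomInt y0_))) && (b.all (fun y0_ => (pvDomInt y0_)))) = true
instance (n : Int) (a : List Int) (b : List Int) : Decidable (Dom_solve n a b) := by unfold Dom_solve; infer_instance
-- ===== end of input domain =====

-- B recomputes the answer from greedy press-bit sequences and window parities instead of
-- mutating two array copies (objective: alternative, same cost).

-- ===== PORT A =====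
-- arr[idx] = 1 - arr[idx]  (exact for 0 ≤ idx < len arr, guaranteed under Pre_)
def togAt (xs : List Int) (i : Int) : List Int :=
  PySem.List.pySetD xs i (1 - PySem.List.pyGetD xs i 0)

def onOp (arr : List Int) (idx : Int) : List Int :=
  let arr := togAt arr idx
  if idx = 0 then togAt arr (idx + 1)
  else if idx = PySem.List.len arr - 1 then togAt arr (idx - 1)
  else togAt (togAt arr (idx - 1)) (idx + 1)

def stepA (b : List Int) (st : List Int × List Int × Int × Int) (i : Int) :
    List Int × List Int × Int × Int :=
  let fon := st.1; let fof := st.2.1; let onc := st.2.2.1; let ofc := st.2.2.2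
  let s1 : List Int × Int :=
    if PySem.List.pyGetD fon (i - 1) 0 ≠ PySem.List.pyGetD b (i - 1) 0 then
      (onOp fon i, onc + 1) else (fon, onc)
  let s2 : List Int × Int :=
    if PySem.List.pyGetD fof (i - 1) 0 ≠ PySem.List.pyGetD b (i - 1) 0 then
      (onOp fof i, ofc + 1) else (fof, ofc)
  (s1.1, s2.1, s1.2, s2.2)

def solve (n : Int) (a : List Int) (b : List Int) : Int :=
  let fon := a
  let fof := a
  let fon := onOp fon 0
  let st := (PySem.List.pyRange 1 n 1).foldl (stepA b) (fon, fof, 1, 0)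
  let result : List Int :=
    (if st.1 = b then [st.2.2.1] else []) ++ (if st.2.1 = b then [st.2.2.2] else [])
  if result.length = 0 then -1
  else (PySem.List.min? result (fun x => x)).getD (-1)

-- ===== PORT B =====
def stepF (a b : List Int) (f : List Int) (i : Int) : List Int :=
  let p := PySem.List.pyGetD f (i - 1) 0 + (if 2 ≤ i then PySem.List.pyGetD f (i - 2) 0 else 0)
  let cur := if PySem.Int.mod p 2 = 0 then PySem.List.pyGetD a (i - 1) 0
             else 1 - PySem.List.pyGetD a (i - 1) 0
  f ++ [if cur ≠ PySem.List.pyGetD b (i - 1) 0 then (1 : Int) else 0]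

-- the window-parity expression t of Source B
def winB (f : List Int) (j : Int) : Int :=
  (if 1 ≤ j ∧ j - 1 < PySem.List.len f then PySem.List.pyGetD f (j - 1) 0 else 0)
  + (if j < PySem.List.len f then PySem.List.pyGetD f j 0 else 0)
  + (if j + 1 < PySem.List.len f then PySem.List.pyGetD f (j + 1) 0 else 0)

def buildRes (a f : List Int) : List Int :=
  (PySem.List.pyRange 0 (PySem.List.len a) 1).foldl (fun res j =>
    res ++ [if PySem.Int.mod (winB f j) 2 = 0 then PySem.List.pyGetD a j 0
            else 1 - PySem.List.pyGetD a j 0]) []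

def solve_alt (n : Int) (a : List Int) (b : List Int) : Int :=
  let m := if 1 < n then n else 1
  let cands := ([(1 : Int), 0]).foldl (fun (cands : List Int) first =>
    let f := (PySem.List.pyRange 1 m 1).foldl (stepF a b) [first]
    let res := buildRes a f
    if res = b then cands ++ [f.sum] else cands) []
  if cands.length = 0 then -1
  else (PySem.List.min? cands (fun x => x)).getD (-1)

-- ===== PRECONDITION & SPEC =====
-- Pre_ excludes exactly the inputs where A hits an IndexError region: fewer than 2 bulbs, or n
-- reaching past a or past b; near the boundary (n > len a) A occasionally avoids the raise by
-- luck when no press past the end is triggered and returns -1 — that accidental corner is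
-- excluded too (see claim.json cites).
def Pre_solve (n : Int) (a : List Int) (b : List Int) : Prop :=
  2 ≤ a.length ∧ n ≤ (a.length : Int) ∧ n - 1 ≤ (b.length : Int)
instance (n : Int) (a : List Int) (b : List Int) : Decidable (Pre_solve n a b) := by
  unfold Pre_solve; infer_instance

def pvWitness_solve : Int × List Int × List Int := (3, [0, 1, 0], [1, 0, 1])

def Spec_solve (n : Int) (a : List Int) (b : List Int) (out : Int) : Prop := out = solve_alt n a b
instance (n : Int) (a : List Int) (b : List Int) (out : Int) : Decidable (Spec_solve n a b out) := by
  unfold Spec_solve; infer_instance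

-- ===== CLAIM (what is proved, stated in full; the proofs are below) =====
def Claim_equal_solve : Prop := ∀ (n : Int) (a : List Int) (b : List Int),
  Dom_solve n a b → Pre_solve n a b → Spec_solve n a b (solve n a b)

-- ===== LEMMAS AND PROOFS =====

-- toggled value after k presses touching a position
def tog (k x : Int) : Int := if PySem.Int.mod k 2 = 0 then x else 1 - x

-- window press count, Nat-indexed, total
def winN (f : List Int) (j : Nat) : Int :=
  (if j = 0 then 0 else f.getD (j - 1) 0) + f.getD j 0 + f.getD (j + 1) 0

def appF (a f : List Int) : List Int :=
  (List.range a.length).map (fun j => tog (winN f j) (a.getD j 0))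

def stepA1 (b : List Int) (p : List Int × Int) (i : Int) : List Int × Int :=
  if PySem.List.pyGetD p.1 (i - 1) 0 ≠ PySem.List.pyGetD b (i - 1) 0 then
    (onOp p.1 i, p.2 + 1) else p

theorem togAt_length (xs : List Int) (i : Int) : (togAt xs i).length = xs.length := by
  simp [togAt, PySem.List.length_pySetD]

theorem togAt_getD (xs : List Int) (i : Int) (h0 : 0 ≤ i) (h1 : i.toNat < xs.length) (j : Nat) :
    (togAt xs i).getD j 0 = if j = i.toNat then 1 - xs.getD j 0 else xs.getD j 0 := by
  simp only [togAt, PySem.List.pySetD_of_nonneg xs _ h0, PySem.List.pyGetD_of_nonneg xs 0 h0,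
    List.getD_eq_getElem?_getD]
  rw [List.getElem?_set]
  by_cases hji : i.toNat = j
  · subst hji; simp [h1]
  · simp [hji, if_neg (fun h : j = i.toNat => hji h.symm)]

theorem togAt_getD_int (xs : List Int) (i : Int) (h0 : 0 ≤ i) (h1 : i < (xs.length : Int))
    (j : Nat) :
    (togAt xs i).getD j 0 = if (j : Int) = i then 1 - xs.getD j 0 else xs.getD j 0 := by
  rw [togAt_getD xs i h0 (by omega)]
  by_cases h : (j : Int) = i
  · rw [if_pos (by omega : j = i.toNat), if_pos h]
  · rw [if_neg (by omega : ¬ j = i.toNat), if_neg h]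

theorem onOp_length (xs : List Int) (i : Int) : (onOp xs i).length = xs.length := by
  unfold onOp
  simp only [PySem.List.len_eq, togAt_length]
  by_cases h0 : i = 0
  · rw [if_pos h0]; simp [togAt_length]
  · rw [if_neg h0]
    by_cases h1 : i = (xs.length : Int) - 1
    · rw [if_pos h1]; simp [togAt_length]
    · rw [if_neg h1]; simp [togAt_length]

theorem onOp_getD (xs : List Int) (k : Nat) (h2 : 2 ≤ xs.length) (hk : k < xs.length)
    (j : Nat) (hj : j < xs.length) :
    (onOp xs (k : Int)).getD j 0 =
      if j + 1 = k ∨ j = k ∨ j = k + 1 then 1 - xs.getD j 0 else xs.getD j 0 := by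
  unfold onOp
  simp only [PySem.List.len_eq, togAt_length]
  by_cases hk0 : (k : Int) = 0
  · -- k = 0 : toggle 0 and 1
    rw [if_pos hk0,
        togAt_getD_int (togAt xs (k : Int)) ((k : Int) + 1) (by omega)
          (by rw [togAt_length]; omega) j,
        togAt_getD_int xs (k : Int) (by omega) (by omega) j]
    generalize xs.getD j 0 = x
    split_ifs <;> first | rfl | omega
  · rw [if_neg hk0]
    by_cases hkl : (k : Int) = (xs.length : Int) - 1
    · -- k = len - 1 : toggle k-1 and k
      rw [if_pos hkl,
          togAt_getD_int (togAt xs (k : Int)) ((k : Int) - 1) (by omega)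
            (by rw [togAt_length]; omega) j,
          togAt_getD_int xs (k : Int) (by omega) (by omega) j]
      generalize xs.getD j 0 = x
      split_ifs <;> first | rfl | omega
    · -- middle : toggle k-1, k, k+1
      rw [if_neg hkl,
          togAt_getD_int (togAt (togAt xs (k : Int)) ((k : Int) - 1)) ((k : Int) + 1) (by omega)
            (by rw [togAt_length, togAt_length]; omega) j,
          togAt_getD_int (togAt xs (k : Int)) ((k : Int) - 1) (by omega)
            (by rw [togAt_length]; omega) j,
          togAt_getD_int xs (k : Int) (by omega) (by omega) j]
      generalize xs.getD j 0 = x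
      split_ifs <;> first | rfl | omega

theorem getD_append_zero (f : List Int) (j : Nat) : (f ++ [(0 : Int)]).getD j 0 = f.getD j 0 := by
  rcases lt_trichotomy j f.length with h | h | h
  · simp [List.getD_eq_getElem?_getD, List.getElem?_append_left h]
  · subst h; simp [List.getD_eq_getElem?_getD]
  · simp [List.getD_eq_getElem?_getD, List.getElem?_eq_none (by simp; omega : (f ++ [(0:Int)]).length ≤ j),
      List.getElem?_eq_none (le_of_lt h)]

theorem getD_append_one (f : List Int) (j : Nat) :
    (f ++ [(1 : Int)]).getD j 0 = f.getD j 0 + (if j = f.length then 1 else 0) := by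
  rcases lt_trichotomy j f.length with h | h | h
  · simp [List.getD_eq_getElem?_getD, List.getElem?_append_left h, Nat.ne_of_lt h]
  · subst h; simp [List.getD_eq_getElem?_getD]
  · simp [List.getD_eq_getElem?_getD, List.getElem?_eq_none (by simp; omega : (f ++ [(1:Int)]).length ≤ j),
      List.getElem?_eq_none (le_of_lt h), Nat.ne_of_gt h]

theorem winN_append_zero (f : List Int) (j : Nat) : winN (f ++ [0]) j = winN f j := by
  unfold winN
  rw [getD_append_zero, getD_append_zero, getD_append_zero]

theorem winN_append_one (f : List Int) (hf : 1 ≤ f.length) (j : Nat) :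
    winN (f ++ [1]) j =
      winN f j + (if j + 1 = f.length ∨ j = f.length ∨ j = f.length + 1 then 1 else 0) := by
  unfold winN
  rw [getD_append_one, getD_append_one, getD_append_one]
  by_cases hj : j = 0
  · subst hj
    have h1 : ¬ (0 = f.length) := by omega
    by_cases h3 : (1:Nat) = f.length <;> simp [h1, h3]
  · simp only [if_neg hj]
    split_ifs <;> omega

theorem tog_add_one (w x : Int) : tog (w + 1) x = 1 - tog w x := by
  unfold tog
  have hlink : PySem.Int.mod (w + 1) 2 ≠ PySem.Int.mod w 2 := by
    unfold PySem.Int.mod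
    simp [Int.fmod_eq_emod]
    omega
  rcases PySem.Int.mod_two_eq w with h | h <;>
    rcases PySem.Int.mod_two_eq (w + 1) with h' | h' <;>
    rw [h, h'] <;> first | (exfalso; rw [h, h'] at hlink; exact hlink rfl) | norm_num

theorem appF_length (a f : List Int) : (appF a f).length = a.length := by
  simp [appF]

theorem appF_getD (a f : List Int) (j : Nat) (hj : j < a.length) :
    (appF a f).getD j 0 = tog (winN f j) (a.getD j 0) := by
  rw [appF, PySem.List.getD_map_range _ _ _ _ hj]

theorem getD_singleton (v : Int) (n : Nat) : ([v] : List Int).getD n 0 = if n = 0 then v else 0 := by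
  cases n <;> simp

theorem mod_zero_two : PySem.Int.mod 0 2 = 0 := by decide
theorem mod_one_two : PySem.Int.mod 1 2 = 1 := by decide

theorem winN_zero_singleton (j : Nat) : winN [(0 : Int)] j = 0 := by
  unfold winN
  rw [getD_singleton, getD_singleton, getD_singleton]
  split_ifs <;> omega

theorem winN_one_singleton (j : Nat) : winN [(1 : Int)] j = if j = 0 ∨ j = 1 then 1 else 0 := by
  unfold winN
  rw [getD_singleton, getD_singleton, getD_singleton]
  split_ifs <;> first | omega | (exfalso; assumption)

theorem appF_zero (a : List Int) : appF a [0] = a := by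
  apply List.ext_getElem (by simp [appF])
  intro j h1 h2
  have : (appF a [0]).getD j 0 = a.getD j 0 := by
    rw [appF_getD a _ j h2, winN_zero_singleton, tog, if_pos mod_zero_two]
  rwa [List.getD_eq_getElem _ _ h1, List.getD_eq_getElem _ _ h2] at this

theorem appF_one (a : List Int) (h2 : 2 ≤ a.length) : appF a [1] = onOp a 0 := by
  apply List.ext_getElem (by simp [appF, onOp_length])
  intro j h1 h2'
  rw [← List.getD_eq_getElem _ 0 h1, ← List.getD_eq_getElem _ 0 h2']
  rw [show onOp a 0 = onOp a ((0 : Nat) : Int) from rfl,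
      onOp_getD a 0 h2 (by omega) j (by rw [appF_length] at h1; exact h1)]
  rw [appF_getD a _ j (by simpa [appF] using h1), winN_one_singleton]
  by_cases hj : j = 0 ∨ j = 1
  · rw [if_pos hj, if_pos (by omega), tog, if_neg (by rw [mod_one_two]; omega)]
  · rw [if_neg hj, if_neg (by omega), tog, if_pos mod_zero_two]

theorem winB_natCast (f : List Int) (j : Nat) : winB f (j : Int) = winN f j := by
  have key : ∀ (i : Int), 0 ≤ i →
      (if i < (f.length : Int) then PySem.List.pyGetD f i 0 else 0) = f.getD i.toNat 0 := by
    intro i h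
    split_ifs with hlt
    · rw [PySem.List.pyGetD_of_nonneg f 0 h]
    · rw [List.getD_eq_default]; omega
  unfold winB
  rw [PySem.List.len_eq]
  by_cases hj : j = 0
  · subst hj
    rw [if_neg (by rintro ⟨hc, -⟩; exact absurd hc (by decide))]
    rw [show ((0 : Nat) : Int) + 1 = ((1 : Nat) : Int) by norm_num]
    rw [key _ (by positivity), key _ (by positivity)]
    simp [winN]
  · have h1 : (if (1 ≤ (j : Int) ∧ (j : Int) - 1 < (f.length : Int)) then
        PySem.List.pyGetD f ((j : Int) - 1) 0 else 0)
        = (if ((j - 1 : Nat) : Int) < (f.length : Int) then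
            PySem.List.pyGetD f ((j - 1 : Nat) : Int) 0 else 0) := by
      rw [show ((j : Int) - 1) = ((j - 1 : Nat) : Int) by push_cast [Nat.cast_sub (by omega : 1 ≤ j)]; ring]
      apply if_congr _ rfl rfl
      constructor
      · rintro ⟨_, h⟩; exact h
      · intro h; exact ⟨by omega, h⟩
    rw [h1, key _ (by positivity),
        show ((j : Int) + 1) = ((j + 1 : Nat) : Int) by norm_num,
        key _ (by positivity), key _ (by positivity)]
    unfold winN
    rw [if_neg hj]
    simp only [Int.toNat_natCast]

theorem buildRes_eq (a f : List Int) : buildRes a f = appF a f := by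
  unfold buildRes appF
  rw [PySem.List.len_eq, PySem.List.pyRange_zero_nat, PySem.List.foldl_append_singleton_eq_map,
      List.nil_append, List.map_map]
  apply List.map_congr_left
  intro j _
  simp only [Function.comp_apply, winB_natCast, PySem.List.pyGetD_natCast, tog]

theorem foldA_decomp (b : List Int) (l : List Int) :
    ∀ (fon fof : List Int) (onc ofc : Int),
      l.foldl (stepA b) (fon, fof, onc, ofc) =
        ((l.foldl (stepA1 b) (fon, onc)).1, (l.foldl (stepA1 b) (fof, ofc)).1,
         (l.foldl (stepA1 b) (fon, onc)).2, (l.foldl (stepA1 b) (fof, ofc)).2) := by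
  induction l with
  | nil => intro fon fof onc ofc; simp
  | cons i t ih =>
      intro fon fof onc ofc
      simp only [List.foldl_cons]
      have hstep : stepA b (fon, fof, onc, ofc) i =
          ((stepA1 b (fon, onc) i).1, (stepA1 b (fof, ofc) i).1,
           (stepA1 b (fon, onc) i).2, (stepA1 b (fof, ofc) i).2) := by
        simp [stepA, stepA1]
      rw [hstep]
      exact ih _ _ _ _

theorem lenF (a b : List Int) (l : List Int) (f : List Int) :
    (l.foldl (stepF a b) f).length = f.length + l.length := by
  induction l generalizing f with
  | nil => simp
  | cons i t ih =>
      simp only [List.foldl_cons, ih]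
      simp [stepF]
      omega

theorem mainInv (a b : List Int) (h2 : 2 ≤ a.length) (f0 : Int) :
    ∀ (k : Nat), 1 ≤ k → k ≤ a.length →
      (PySem.List.pyRange 1 (k : Int) 1).foldl (stepA1 b) (appF a [f0], [f0].sum)
        = (appF a ((PySem.List.pyRange 1 (k : Int) 1).foldl (stepF a b) [f0]),
           ((PySem.List.pyRange 1 (k : Int) 1).foldl (stepF a b) [f0]).sum) := by
  intro k hk1
  induction k, hk1 using Nat.le_induction with
  | base =>
      intro _
      rw [PySem.List.pyRange_one_eq_nil (by norm_num)]
      simp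
  | succ k hk ih =>
      intro hka
      have hklen : k ≤ a.length := by omega
      rw [show ((k + 1 : Nat) : Int) = (k : Int) + 1 by push_cast; ring,
          PySem.List.pyRange_one_succ_right (by exact_mod_cast hk : (1 : Int) ≤ (k : Int)),
          List.foldl_append, List.foldl_append, ih hklen]
      set f := (PySem.List.pyRange 1 (k : Int) 1).foldl (stepF a b) [f0] with hf
      simp only [List.foldl_cons, List.foldl_nil]
      have hflen : f.length = k := by
        rw [hf, lenF]
        simp [PySem.List.length_pyRange_one]
        omega
      have hidx : ((k : Int) - 1) = ((k - 1 : Nat) : Int) := by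
        push_cast [Nat.cast_sub (by omega : 1 ≤ k)]; ring
      have hgk : f.getD ((k - 1) + 1) 0 = 0 := by
        rw [List.getD_eq_default]; omega
      have hp : f.getD (k - 1) 0 +
          (if 2 ≤ (k : Int) then PySem.List.pyGetD f ((k : Int) - 2) 0 else 0)
          = winN f (k - 1) := by
        unfold winN
        rw [hgk]
        by_cases h2k : 2 ≤ k
        · rw [if_pos (by exact_mod_cast h2k),
              show ((k : Int) - 2) = ((k - 2 : Nat) : Int) by
                push_cast [Nat.cast_sub (by omega : 2 ≤ k)]; ring,
              PySem.List.pyGetD_natCast,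
              if_neg (by omega : ¬ (k - 1 = 0)),
              show (k - 1) - 1 = k - 2 by omega]
          ring
        · have hk1' : k = 1 := by omega
          subst hk1'
          rw [if_neg (by norm_num), if_pos rfl]
          ring
      -- unfold the two step functions and align the conditions
      simp only [stepA1, stepF, hidx, PySem.List.pyGetD_natCast]
      rw [hp, appF_getD a f (k - 1) (by omega), tog]
      by_cases hcond :
          (if PySem.Int.mod (winN f (k - 1)) 2 = 0 then a.getD (k - 1) 0
           else 1 - a.getD (k - 1) 0) ≠ b.getD (k - 1) 0
      · rw [if_pos hcond, if_pos hcond]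
        have honA : onOp (appF a f) ((k : Int)) = appF a (f ++ [1]) := by
          apply List.ext_getElem (by rw [onOp_length, appF_length, appF_length])
          intro j hj1 hj2
          have hja : j < a.length := by rw [onOp_length, appF_length] at hj1; exact hj1
          rw [← List.getD_eq_getElem _ 0 hj1, ← List.getD_eq_getElem _ 0 hj2,
              onOp_getD (appF a f) k (by rw [appF_length]; omega)
                (by rw [appF_length]; omega) j (by rw [appF_length]; exact hja),
              appF_getD a f j hja, appF_getD a (f ++ [1]) j hja,
              winN_append_one f (by omega) j, hflen]
          by_cases hnear : j + 1 = k ∨ j = k ∨ j = k + 1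
          · rw [if_pos hnear, if_pos hnear, tog_add_one]
          · rw [if_neg hnear, if_neg hnear, add_zero]
        rw [honA, List.sum_append]
        simp
      · rw [if_neg hcond, if_neg hcond]
        have honA : appF a f = appF a (f ++ [0]) := by
          apply List.ext_getElem (by rw [appF_length, appF_length])
          intro j hj1 hj2
          have hja : j < a.length := by rw [appF_length] at hj1; exact hj1
          rw [← List.getD_eq_getElem _ 0 hj1, ← List.getD_eq_getElem _ 0 hj2,
              appF_getD a f j hja, appF_getD a (f ++ [0]) j hja, winN_append_zero]
        rw [← honA, List.sum_append]
        simp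

-- ===== VERDICT (by name: the statement is the Claim_ definition above) =====
theorem solve_spec : Claim_equal_solve := by
  intro n a b _ hpre
  obtain ⟨h2, hna, hnb⟩ := hpre
  unfold Spec_solve
  by_cases hn : 1 < n
  · obtain ⟨K, rfl⟩ : ∃ K : Nat, n = (K : Int) :=
      ⟨n.toNat, (Int.toNat_of_nonneg (by omega)).symm⟩
    have hK1 : 1 ≤ K := by omega
    have hKa : K ≤ a.length := by exact_mod_cast hna
    have e1 : (PySem.List.pyRange 1 (K : Int) 1).foldl (stepA1 b) (onOp a 0, 1)
        = (appF a ((PySem.List.pyRange 1 (K : Int) 1).foldl (stepF a b) [1]),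
           ((PySem.List.pyRange 1 (K : Int) 1).foldl (stepF a b) [1]).sum) := by
      rw [show ((onOp a 0, (1 : Int))) = (appF a [1], ([(1 : Int)]).sum) by
            rw [appF_one a h2]; simp]
      exact mainInv a b h2 1 K hK1 hKa
    have e0 : (PySem.List.pyRange 1 (K : Int) 1).foldl (stepA1 b) (a, 0)
        = (appF a ((PySem.List.pyRange 1 (K : Int) 1).foldl (stepF a b) [0]),
           ((PySem.List.pyRange 1 (K : Int) 1).foldl (stepF a b) [0]).sum) := by
      rw [show ((a, (0 : Int))) = (appF a [0], ([(0 : Int)]).sum) by rw [appF_zero]; simp]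
      exact mainInv a b h2 0 K hK1 hKa
    simp only [solve, solve_alt, if_pos hn]
    rw [foldA_decomp b _ (onOp a 0) a 1 0, e1, e0]
    simp only [List.foldl_cons, List.foldl_nil, buildRes_eq]
    by_cases hA : appF a ((PySem.List.pyRange 1 (K : Int) 1).foldl (stepF a b) [1]) = b <;>
      by_cases hB : appF a ((PySem.List.pyRange 1 (K : Int) 1).foldl (stepF a b) [0]) = b <;>
      simp [hA, hB]
  · simp only [solve, solve_alt, if_neg hn,
      PySem.List.pyRange_one_eq_nil (by omega : n ≤ (1 : Int)),
      PySem.List.pyRange_one_eq_nil (by norm_num : (1 : Int) ≤ 1),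
      List.foldl_cons, List.foldl_nil, buildRes_eq, appF_one a h2, appF_zero]
    by_cases hA : onOp a 0 = b <;> by_cases hB : a = b <;> simp [hA, hB]
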